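-- pv_equiv track=rewrite | github.com/tilaloz/big-boggle-solver | boggle.py | find_digraphs
-- ===== SOURCE A (Python) =====
-- def find_digraphs(words):
--     n = 2
--     digraphs = []
--     for line in words:
--         for i in range(0,len(line)-(n-1)):
--             if not line[i:i+n] in digraphs:
--                 digraphs.append(line[i:i+n])
--     return digraphs
-- ===== SOURCE B (Python) =====
-- def find_digraphs(words):
--     occ = [line[i:i+2] for line in words for i in range(len(line)-1)]
--     first = {}
--     for idx, dg in enumerate(occ):
--         first.setdefault(dg, idx)
--     return sorted(first, key=first.get)
-- ===== Notes on version B (the rewrite author's own statement) =====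
-- stated objective: alternative
-- what changed: B first builds an index mapping each digraph to its earliest global position (setdefault over the enumerated flat digraph stream) and then reconstructs first-appearance order by SORTING the distinct digraphs by that position, instead of A's incremental scan that membership-tests the result list before each append.
import Mathlib
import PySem

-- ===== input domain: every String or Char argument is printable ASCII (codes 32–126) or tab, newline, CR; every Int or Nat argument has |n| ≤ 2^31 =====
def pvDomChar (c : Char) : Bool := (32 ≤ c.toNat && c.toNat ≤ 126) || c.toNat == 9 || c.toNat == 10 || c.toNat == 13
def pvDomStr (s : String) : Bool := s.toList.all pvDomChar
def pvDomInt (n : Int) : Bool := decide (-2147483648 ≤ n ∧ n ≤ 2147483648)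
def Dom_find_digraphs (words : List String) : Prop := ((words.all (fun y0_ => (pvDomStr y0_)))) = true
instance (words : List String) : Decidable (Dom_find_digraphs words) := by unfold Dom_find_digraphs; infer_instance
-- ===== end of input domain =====

-- B rebuilds first-appearance order by sorting the distinct digraphs by their earliest position, instead of A's membership-scan-and-append loop (alternative algorithm).


-- ===== PORT A =====
-- for line in words: for i in range(0, len(line)-1): if not line[i:i+2] in digraphs: digraphs.append(line[i:i+2])
def find_digraphs (words : List String) : List String :=
  words.foldl (fun digraphs line =>
    (PySem.List.pyRange 0 (PySem.Str.len line - 1) 1).foldl (fun acc i =>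
      if PySem.Str.slice line (some i) (some (i + 2)) ∈ acc then acc
      else acc ++ [PySem.Str.slice line (some i) (some (i + 2))]) digraphs) []

-- ===== PORT B =====
-- occ = [line[i:i+2] for line in words for i in range(len(line)-1)]
-- first = {}; for idx, dg in enumerate(occ): first.setdefault(dg, idx)
-- return sorted(first, key=first.get)   -- first.get: every sorted element is a key of first, so getD 0 is exact there
def find_digraphs_alt (words : List String) : List String :=
  let occ := words.flatMap (fun line =>
    (PySem.List.pyRange 0 (PySem.Str.len line - 1) 1).map
      (fun i => PySem.Str.slice line (some i) (some (i + 2))))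
  let first := (PySem.List.enumerate occ).foldl
    (fun d p => d.setdefault p.2 p.1) PySem.Dict.empty
  PySem.List.sorted first.keys (fun dg => (first.get? dg).getD 0) false

-- ===== PRECONDITION & SPEC =====
def Spec_find_digraphs (words : List String) (out : List String) : Prop := out = find_digraphs_alt words
instance (words : List String) (out : List String) : Decidable (Spec_find_digraphs words out) := by unfold Spec_find_digraphs; infer_instance

-- ===== CLAIM (what is proved, stated in full; the proofs are below) =====
def Claim_equal_find_digraphs : Prop := ∀ (words : List String), Dom_find_digraphs words → Spec_find_digraphs words (find_digraphs words)

-- ===== LEMMAS AND PROOFS =====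

-- folding over a flatMap = nested fold
theorem pv_foldl_flatMap {α β γ : Type} (f : α → List β) (g : γ → β → γ) (l : List α) (init : γ) :
    (l.flatMap f).foldl g init = l.foldl (fun acc x => (f x).foldl g acc) init := by
  induction l generalizing init with
  | nil => rfl
  | cons h t ih => simp [List.flatMap_cons, List.foldl_append, ih]

-- A's conditional-append step is PySem.Set.add
theorem pv_step_eq_add (acc : List String) (s : String) :
    (if s ∈ acc then acc else acc ++ [s]) = PySem.Set.add acc s := by
  simp only [PySem.Set.add]
  split_ifs with h1 h2 h2 <;> first | rfl | (exfalso; simp_all)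

-- A equals the ordered dedup of the flat digraph stream
theorem pv_A_eq_dedup (words : List String) :
    find_digraphs words
      = PySem.List.dedup (words.flatMap (fun line =>
          (PySem.List.pyRange 0 (PySem.Str.len line - 1) 1).map
            (fun i => PySem.Str.slice line (some i) (some (i + 2))))) := by
  unfold find_digraphs
  simp only [PySem.List.dedup, PySem.Set.ofList, PySem.Set.empty]
  rw [pv_foldl_flatMap]
  congr 1
  funext acc line
  rw [List.foldl_map]
  congr 1
  funext a i
  exact pv_step_eq_add a _

-- appending one element to the deduped stream is a Set.add
theorem pv_dedup_append_singleton (t : List String) (x : String) :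
    PySem.List.dedup (t ++ [x]) = PySem.Set.add (PySem.List.dedup t) x := by
  simp [PySem.List.dedup_eq_ofList, PySem.Set.ofList_eq_foldl, List.foldl_append]

-- dedup l = the elements at first-occurrence positions, in position order
theorem pv_dedup_char (l : List String) :
    PySem.List.dedup l
      = ((List.range l.length).filter (fun i => !(l.take i).contains (l.getD i ""))).map
          (fun i => l.getD i "") := by
  induction l using List.reverseRecOn with
  | nil => simp
  | append_singleton t x ih =>
    rw [pv_dedup_append_singleton, ih]
    simp only [List.length_append, List.length_cons, List.length_nil, Nat.zero_add,
      List.range_succ, List.filter_append, List.map_append]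
    have hcond : ∀ i ∈ List.range t.length,
        (!((t ++ [x]).take i).contains ((t ++ [x]).getD i ""))
          = (!(t.take i).contains (t.getD i "")) := by
      intro i hi
      have hi' : i < t.length := List.mem_range.mp hi
      rw [List.getD_append _ _ _ _ hi', List.take_append_of_le_length (le_of_lt hi')]
    have hmapf : ∀ i ∈ (List.range t.length).filter
        (fun i => !((t ++ [x]).take i).contains ((t ++ [x]).getD i "")),
        (t ++ [x]).getD i "" = t.getD i "" := by
      intro i hi
      exact List.getD_append _ _ _ _ (List.mem_range.mp (List.mem_of_mem_filter hi))
    rw [List.filter_congr hcond] at hmapf ⊢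
    rw [List.map_congr_left hmapf]
    set M := ((List.range t.length).filter (fun i => !(t.take i).contains (t.getD i ""))).map
      (fun i => t.getD i "") with hM
    have hgetn : (t ++ [x]).getD t.length "" = x := by
      simp [List.getD_eq_getElem?_getD]
    have htaken : (t ++ [x]).take t.length = t := List.take_left
    by_cases hx : x ∈ t
    · have hcont : t.contains x = true := by simpa using hx
      have hmem : x ∈ M := by rw [← ih]; exact (PySem.List.mem_dedup t x).mpr hx
      have hsing : List.filter (fun i => !((t ++ [x]).take i).contains ((t ++ [x]).getD i ""))
          [t.length] = [] := by
        simp [htaken, hx]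
      rw [hsing, List.map_nil, List.append_nil]
      show (if PySem.Set.contains M x then M else M ++ [x]) = M
      simp [PySem.Set.contains, hmem]
    · have hcont : t.contains x = false := by simpa using hx
      have hmem : x ∉ M := by rw [← ih]; exact fun hm => hx ((PySem.List.mem_dedup t x).mp hm)
      have hsing : List.filter (fun i => !((t ++ [x]).take i).contains ((t ++ [x]).getD i ""))
          [t.length] = [t.length] := by
        simp [htaken, hx]
      rw [hsing, List.map_cons, List.map_nil, hgetn]
      show (if PySem.Set.contains M x then M else M ++ [x]) = M ++ [x]
      simp [PySem.Set.contains, hmem]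

-- lookup in the swapped enumeration finds the first-occurrence position
theorem pv_lookup_enum (l : List String) (s : Int) (i : Nat) (hi : i < l.length)
    (hfresh : (l.take i).contains (l.getD i "") = false) :
    ((PySem.List.enumerate l s).map (fun p => (p.2, p.1))).lookup (l.getD i "")
      = some (s + i) := by
  induction l generalizing s i with
  | nil => simp at hi
  | cons y t ih =>
    cases i with
    | zero => simp [PySem.List.enumerate_cons]
    | succ j =>
      simp only [List.take_succ_cons, List.getD_cons_succ, List.contains_cons,
        Bool.or_eq_false_iff] at hfresh
      obtain ⟨h1, h2⟩ := hfresh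
      rw [PySem.List.enumerate_cons]
      simp only [List.map_cons, List.getD_cons_succ, List.lookup_cons]
      simp only [h1]
      rw [ih (s + 1) j (by simpa using hi) h2]
      congr 1
      push_cast
      ring

-- get? after the setdefault fold = first match in the swapped pair list
theorem pv_get_setdefault_fold (ps : List (Int × String)) (d : PySem.Dict String Int) (x : String) :
    (ps.foldl (fun d p => d.setdefault p.2 p.1) d).get? x
      = ((d.get? x).or ((ps.map (fun p => (p.2, p.1))).lookup x)) := by
  induction ps generalizing d with
  | nil => simp
  | cons p t ih =>
    rw [List.foldl_cons, ih]
    by_cases h : x = p.2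
    · subst h
      rw [PySem.Dict.get?_setdefault_self]
      simp only [List.map_cons, List.lookup_cons, beq_self_eq_true]
      cases d.get? p.2 <;> simp
    · rw [PySem.Dict.get?_setdefault_of_ne d p.1 h]
      have hb : (x == p.2) = false := beq_eq_false_iff_ne.mpr h
      simp [List.lookup_cons, hb]

-- keys after the setdefault fold
theorem pv_keys_setdefault_fold (ps : List (Int × String)) (d : PySem.Dict String Int) :
    (ps.foldl (fun d p => d.setdefault p.2 p.1) d).keys
      = PySem.Set.update d.keys (ps.map (·.2)) := by
  induction ps generalizing d with
  | nil => rfl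
  | cons p t ih =>
    rw [List.foldl_cons, ih]
    simp only [List.map_cons]
    rw [show PySem.Set.update d.keys (p.2 :: List.map (fun p => p.2) t)
          = PySem.Set.update (PySem.Set.add d.keys p.2) (List.map (fun p => p.2) t) from rfl]
    congr 1
    rw [PySem.Dict.keys_setdefault]
    by_cases hc : d.contains p.2 = true
    · have hm : p.2 ∈ d.keys := (PySem.Dict.contains_iff_mem_keys d p.2).mp hc
      simp [hc, PySem.Set.add, PySem.Set.contains, hm]
    · have hm : p.2 ∉ d.keys := fun hmem => hc ((PySem.Dict.contains_iff_mem_keys d p.2).mpr hmem)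
      simp [hc, PySem.Set.add, PySem.Set.contains, hm]

-- the first-occurrence key is strictly increasing along dedup l
theorem pv_pairwise (l : List String) :
    (PySem.List.dedup l).Pairwise (fun a b =>
      (((PySem.List.enumerate l).map (fun p => (p.2, p.1))).lookup a).getD 0
        < (((PySem.List.enumerate l).map (fun p => (p.2, p.1))).lookup b).getD 0) := by
  rw [pv_dedup_char, List.pairwise_map]
  have base : (List.range l.length).Pairwise (· < ·) := List.pairwise_lt_range
  refine (base.filter (fun i => !(l.take i).contains (l.getD i ""))).imp_of_mem ?_
  intro a b ha hb hab
  have ha' := List.mem_filter.mp ha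
  have hb' := List.mem_filter.mp hb
  rw [pv_lookup_enum l 0 a (List.mem_range.mp ha'.1) (by simpa using ha'.2),
      pv_lookup_enum l 0 b (List.mem_range.mp hb'.1) (by simpa using hb'.2)]
  simpa using hab

-- B's sorted-by-first-position pipeline over any stream l equals the ordered dedup of l
theorem pv_sorted_eq_dedup (l : List String) :
    PySem.List.sorted
      ((PySem.List.enumerate l).foldl (fun d p => d.setdefault p.2 p.1) PySem.Dict.empty).keys
      (fun dg => (((PySem.List.enumerate l).foldl (fun d p => d.setdefault p.2 p.1)
        PySem.Dict.empty).get? dg).getD 0) false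
      = PySem.List.dedup l := by
  have hkeys : ((PySem.List.enumerate l).foldl (fun d p => d.setdefault p.2 p.1)
      PySem.Dict.empty).keys = PySem.List.dedup l := by
    rw [pv_keys_setdefault_fold, PySem.List.map_snd_enumerate, PySem.Dict.keys_empty]
    rw [PySem.List.dedup_eq_ofList, PySem.Set.ofList_eq_foldl]
    rfl
  have hget : ∀ x, ((PySem.List.enumerate l).foldl (fun d p => d.setdefault p.2 p.1)
      PySem.Dict.empty).get? x
      = ((PySem.List.enumerate l).map (fun p => (p.2, p.1))).lookup x := by
    intro x
    rw [pv_get_setdefault_fold]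
    simp
  rw [hkeys]
  refine PySem.List.sorted_eq_of_perm_of_pairwise_lt _ _ _ (List.Perm.refl _) ?_
  refine (pv_pairwise l).imp ?_
  intro a b h
  rw [hget a, hget b]
  exact h

-- ===== VERDICT (by name: the statement is the Claim_ definition above) =====
theorem find_digraphs_spec : Claim_equal_find_digraphs := by
  intro words _
  unfold Spec_find_digraphs
  rw [pv_A_eq_dedup]
  exact (pv_sorted_eq_dedup _).symm
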